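-- pv_equiv track=rewrite | github.com/powershang/realtek_pc | NX python/TEMP/check_dic_qos.py | find_rtd_outl_differences
-- ===== SOURCE A (Python) =====
-- def find_rtd_outl_differences(version_rtd_data):
--     """
--     Find differences in rtd_outl entries between versions.
--
--     Args:
--         version_rtd_data: Dict mapping version hash to {address: (data, line)}
--
--     Returns:
--         dict: Differences organized by address
--     """
--     if len(version_rtd_data) < 2:
--         return {}
--
--     # Collect all addresses across all versions
--     all_addresses = set()
--     for rtd_data in version_rtd_data.values():
--         all_addresses.update(rtd_data.keys())
--
--     differences = {}  # {address: {hash: (data, line)}}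
--
--     # Check each address to see if it has different values across versions
--     for address in sorted(all_addresses):
--         version_values = {}
--         for version_hash, rtd_data in version_rtd_data.items():
--             if address in rtd_data:
--                 data, line = rtd_data[address]
--                 version_values[version_hash] = (data, line)
--             else:
--                 version_values[version_hash] = (None, None)  # Address not present
--
--         # Check if this address has different values across versions
--         unique_values = set(data for data, _ in version_values.values() if data is not None)
--
--         # If more than one unique value, or some versions missing this address
--         has_none = any(data is None for data, _ in version_values.values())
--         if len(unique_values) > 1 or (len(unique_values) == 1 and has_none):
--             differences[address] = version_values
--
--     return differences
-- ===== SOURCE B (Python) =====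
-- def find_rtd_outl_differences(version_rtd_data):
--     """One pass over all present entries tallies, per address, the set of
--     distinct data values and in how many versions the address occurs; the
--     full per-version map is then built only for the differing addresses."""
--     if len(version_rtd_data) < 2:
--         return {}
--     n_versions = len(version_rtd_data)
--     uniq = {}     # address -> set of data values seen across versions
--     present = {}  # address -> number of versions containing the address
--     for rtd_data in version_rtd_data.values():
--         for address, (data, _line) in rtd_data.items():
--             uniq.setdefault(address, set()).add(data)
--             present[address] = present.get(address, 0) + 1
--     differences = {}
--     for address in sorted(uniq):
--         if len(uniq[address]) > 1 or present[address] < n_versions: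
--             differences[address] = {
--                 version_hash: rtd_data.get(address, (None, None))
--                 for version_hash, rtd_data in version_rtd_data.items()
--             }
--     return differences
-- ===== Notes on version B (the rewrite author's own statement) =====
-- stated objective: alternative
-- what changed: A rescans every version for every address and builds the full per-version map before deciding; B makes one pass over the present entries tallying, per address, the set of distinct data values and a presence count, and builds the per-version map only for the addresses that actually differ.
import Mathlib
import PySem

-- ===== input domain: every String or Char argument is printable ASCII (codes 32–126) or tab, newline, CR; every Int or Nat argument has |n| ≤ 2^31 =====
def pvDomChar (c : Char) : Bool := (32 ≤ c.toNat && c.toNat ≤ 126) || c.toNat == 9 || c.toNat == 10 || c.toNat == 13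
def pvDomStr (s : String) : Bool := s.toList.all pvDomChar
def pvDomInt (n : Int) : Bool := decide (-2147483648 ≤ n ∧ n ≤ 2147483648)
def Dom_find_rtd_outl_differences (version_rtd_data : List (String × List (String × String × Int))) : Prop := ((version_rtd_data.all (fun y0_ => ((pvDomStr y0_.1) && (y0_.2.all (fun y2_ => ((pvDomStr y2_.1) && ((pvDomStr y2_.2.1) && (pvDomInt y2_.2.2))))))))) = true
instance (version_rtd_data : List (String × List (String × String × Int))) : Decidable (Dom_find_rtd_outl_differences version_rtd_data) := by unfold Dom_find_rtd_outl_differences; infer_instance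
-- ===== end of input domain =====

-- B replaces A's per-address rescans of every version by one pass over all present
-- entries that tallies, per address, the distinct data values and a presence count;
-- the per-version map is then built only for the differing addresses (a different
-- algorithm of similar measured cost: the output itself is per-address-per-version).

-- ===== PORT A =====
-- inner loop of A: version_values for one address ('if address in rtd_data: … = rtd_data[address]'
-- is the one first-match dict lookup, written as a match on get?)
def pvA_version_values (version_rtd_data : List (String × List (String × String × Int))) (address : String) :
    PySem.Dict String (Option String × Option Int) :=
  version_rtd_data.foldl (fun vv p =>
    match (PySem.Dict.mk p.2).get? address with
    | some dl => vv.insert p.1 (some dl.1, some dl.2)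
    | none    => vv.insert p.1 (none, none)) PySem.Dict.empty

-- 'differences[address] = version_values' over the distinct sorted addresses: each
-- dict insert is an append (addresses from a sorted set are pairwise distinct under Pre_)
def find_rtd_outl_differences (version_rtd_data : List (String × List (String × String × Int))) :
    List (String × List (String × Option String × Option Int)) :=
  if version_rtd_data.length < 2 then [] else
  let all_addresses : PySem.Set String :=
    version_rtd_data.foldl (fun s p => PySem.Set.update s (PySem.Dict.mk p.2).keys) PySem.Set.empty
  (PySem.List.sorted all_addresses (fun a => a)).foldl (fun differences address =>
    let version_values := pvA_version_values version_rtd_data address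
    let unique_values : PySem.Set String :=
      PySem.Set.ofList (version_values.values.filterMap (fun dl => dl.1))
    let has_none : Bool := version_values.values.any (fun dl => dl.1.isNone)
    if 1 < PySem.Set.len unique_values ∨ (PySem.Set.len unique_values = 1 ∧ has_none = true) then
      differences ++ [(address, version_values.items)]
    else differences) []

-- ===== PORT B =====
-- inner loop of B: tally one version's entries into (uniq, present)
def pvB_tally (st : PySem.Dict String (PySem.Set String) × PySem.Dict String Int)
    (rtd : List (String × String × Int)) :
    PySem.Dict String (PySem.Set String) × PySem.Dict String Int :=
  rtd.foldl (fun st e =>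
    (st.1.modify e.1 PySem.Set.empty (fun s => PySem.Set.add s e.2.1),
     st.2.modify e.1 0 (fun c => c + 1))) st

-- 'differences[address] = {…}' over the distinct sorted addresses: each dict insert is an
-- append; 'uniq[address]' / 'present[address]' always hit (address comes from uniq's keys),
-- written as getD; 'rtd_data.get(address, (None, None))' is the match below (Option-wrapped
-- per the return type convention)
def find_rtd_outl_differences_alt (version_rtd_data : List (String × List (String × String × Int))) :
    List (String × List (String × Option String × Option Int)) :=
  if version_rtd_data.length < 2 then [] else
  let n_versions := version_rtd_data.length
  let tallies := version_rtd_data.foldl (fun st p => pvB_tally st p.2)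
    ((PySem.Dict.empty, PySem.Dict.empty) :
      PySem.Dict String (PySem.Set String) × PySem.Dict String Int)
  (PySem.List.sorted tallies.1.keys (fun a => a)).foldl (fun differences address =>
    if 1 < PySem.Set.len (tallies.1.getD address PySem.Set.empty)
        ∨ tallies.2.getD address 0 < (n_versions : Int) then
      differences ++ [(address,
        version_rtd_data.map (fun p => (p.1,
          match (PySem.Dict.mk p.2).get? address with
          | some dl => ((some dl.1, some dl.2) : Option String × Option Int)
          | none    => (none, none))))]
    else differences) []

-- ===== PRECONDITION & SPEC =====
-- Pre_ only rules out association lists that do not encode a Python dict (duplicate version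
-- hashes, or duplicate addresses within one version): the Python inputs are dicts, whose keys
-- are always unique, so nothing A accepts is excluded.
def Pre_find_rtd_outl_differences (version_rtd_data : List (String × List (String × String × Int))) : Prop :=
  (version_rtd_data.map (fun p => p.1)).Nodup ∧
  ∀ p ∈ version_rtd_data, (p.2.map (fun e => e.1)).Nodup
instance (version_rtd_data : List (String × List (String × String × Int))) : Decidable (Pre_find_rtd_outl_differences version_rtd_data) := by unfold Pre_find_rtd_outl_differences; infer_instance

def pvWitness_find_rtd_outl_differences : (List (String × List (String × String × Int))) :=
  [("v1", [("a", "x", 1)]), ("v2", [])]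

def Spec_find_rtd_outl_differences (version_rtd_data : List (String × List (String × String × Int))) (out : List (String × List (String × Option String × Option Int))) : Prop := out = find_rtd_outl_differences_alt version_rtd_data
instance (version_rtd_data : List (String × List (String × String × Int))) (out : List (String × List (String × Option String × Option Int))) : Decidable (Spec_find_rtd_outl_differences version_rtd_data out) := by unfold Spec_find_rtd_outl_differences; infer_instance

-- ===== CLAIM (what is proved, stated in full; the proofs are below) =====
def Claim_equal_find_rtd_outl_differences : Prop := ∀ (version_rtd_data : List (String × List (String × String × Int))), Dom_find_rtd_outl_differences version_rtd_data → Pre_find_rtd_outl_differences version_rtd_data → Spec_find_rtd_outl_differences version_rtd_data (find_rtd_outl_differences version_rtd_data)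

-- ===== LEMMAS AND PROOFS =====

-- one version's first-match lookup at an address, and its Option-wrapped form
def pvLk (p : String × List (String × String × Int)) (a : String) : Option (String × Int) :=
  (PySem.Dict.mk p.2).get? a

def pvConv (o : Option (String × Int)) : Option String × Option Int :=
  match o with
  | some dl => (some dl.1, some dl.2)
  | none    => (none, none)

-- the data values present at address a, in version order
def pvDatas (V : List (String × List (String × String × Int))) (a : String) : List String :=
  V.filterMap (fun p => (pvLk p a).map (fun dl => dl.1))

-- the two components of B's tally step
def pvM1 (d : PySem.Dict String (PySem.Set String)) (e : String × String × Int) :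
    PySem.Dict String (PySem.Set String) :=
  d.modify e.1 PySem.Set.empty (fun s => PySem.Set.add s e.2.1)

def pvM2 (d : PySem.Dict String Int) (e : String × String × Int) : PySem.Dict String Int :=
  d.modify e.1 0 (fun c => c + 1)

theorem pvB_tally_eq (st) (rtd : List (String × String × Int)) :
    pvB_tally st rtd = (rtd.foldl pvM1 st.1, rtd.foldl pvM2 st.2) := by
  obtain ⟨d1, d2⟩ := st
  exact PySem.List.foldl_prod_mk pvM1 pvM2 rtd d1 d2

theorem pvTallies_eq (V : List (String × List (String × String × Int))) :
    V.foldl (fun st p => pvB_tally st p.2)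
      ((PySem.Dict.empty, PySem.Dict.empty) :
        PySem.Dict String (PySem.Set String) × PySem.Dict String Int) =
      (V.foldl (fun d p => p.2.foldl pvM1 d) PySem.Dict.empty,
       V.foldl (fun d p => p.2.foldl pvM2 d) PySem.Dict.empty) := by
  have h : (fun (st : PySem.Dict String (PySem.Set String) × PySem.Dict String Int)
      (p : String × List (String × String × Int)) => pvB_tally st p.2) =
      (fun st p => (p.2.foldl pvM1 st.1, p.2.foldl pvM2 st.2)) := by
    funext st p
    exact pvB_tally_eq st p.2
  rw [h]
  exact PySem.List.foldl_prod_mk (fun d p => p.2.foldl pvM1 d) (fun d p => p.2.foldl pvM2 d) V _ _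

theorem pvKeys_eq (V : List (String × List (String × String × Int)))
    (d : PySem.Dict String (PySem.Set String)) :
    (V.foldl (fun d p => p.2.foldl pvM1 d) d).keys =
      V.foldl (fun s p => PySem.Set.update s (PySem.Dict.mk p.2).keys) d.keys := by
  induction V generalizing d with
  | nil => rfl
  | cons p V ih =>
    simp only [List.foldl_cons]
    rw [ih]
    have hk : (p.2.foldl pvM1 d).keys = PySem.Set.update d.keys (p.2.map (fun e => e.1)) := by
      exact PySem.Dict.keys_foldl_modify_key p.2 (fun e => e.1) PySem.Set.empty
        (fun _ e => (fun s => PySem.Set.add s e.2.1)) d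
    rw [hk]
    simp [PySem.Dict.keys_mk]

theorem pvLk_isSome (p : String × List (String × String × Int)) (a : String) :
    (pvLk p a).isSome ↔ a ∈ p.2.map (fun e => e.1) := by
  rw [pvLk, ← PySem.Dict.contains_eq_isSome_get?, ← Bool.coe_iff_coe (b := true)]
  simp

theorem pvMem_addrs (V : List (String × List (String × String × Int))) (s : PySem.Set String)
    (a : String) :
    a ∈ V.foldl (fun s p => PySem.Set.update s (PySem.Dict.mk p.2).keys) s ↔
      a ∈ s ∨ ∃ p ∈ V, (pvLk p a).isSome := by
  induction V generalizing s with
  | nil => simp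
  | cons q V ih =>
    rw [List.foldl_cons, ih]
    rw [PySem.Set.mem_update]
    simp only [List.exists_mem_cons_iff, pvLk_isSome, PySem.Dict.keys_mk]
    tauto

theorem pvA_items (V : List (String × List (String × String × Int))) (a : String)
    (h : (V.map (fun p => p.1)).Nodup) :
    (pvA_version_values V a).items = V.map (fun p => (p.1, pvConv (pvLk p a))) := by
  have hf : (fun (vv : PySem.Dict String (Option String × Option Int)) (p : String × List (String × String × Int)) =>
      match (PySem.Dict.mk p.2).get? a with
      | some dl => vv.insert p.1 (some dl.1, some dl.2)
      | none    => vv.insert p.1 (none, none)) =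
      (fun vv p => vv.insert p.1 (pvConv (pvLk p a))) := by
    funext vv p
    rw [pvLk]
    cases (PySem.Dict.mk p.2).get? a <;> rfl
  rw [pvA_version_values, hf]
  have := PySem.Dict.items_foldl_insert_fresh V (fun p => p.1) (fun p => pvConv (pvLk p a))
    PySem.Dict.empty (by intro p _; rfl) h
  simpa using this

theorem pvInner_skip (l : List (String × String × Int)) (d : PySem.Dict String (PySem.Set String))
    (a : String) (h : a ∉ l.map (fun e => e.1)) :
    (l.foldl pvM1 d).getD a PySem.Set.empty = d.getD a PySem.Set.empty := by
  induction l generalizing d with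
  | nil => rfl
  | cons e l ih =>
    simp only [List.map_cons, List.mem_cons, not_or] at h
    rw [List.foldl_cons, ih _ h.2, pvM1, PySem.Dict.getD_modify, if_neg h.1]

theorem pvInner_uniq (l : List (String × String × Int)) (d : PySem.Dict String (PySem.Set String))
    (a : String) (h : (l.map (fun e => e.1)).Nodup) :
    (l.foldl pvM1 d).getD a PySem.Set.empty =
      match (PySem.Dict.mk l).get? a with
      | some dl => PySem.Set.add (d.getD a PySem.Set.empty) dl.1
      | none    => d.getD a PySem.Set.empty := by
  induction l generalizing d with
  | nil => rfl
  | cons e l ih =>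
    simp only [List.map_cons, List.nodup_cons] at h
    rw [List.foldl_cons, PySem.Dict.get?_mk_cons]
    by_cases hae : a = e.1
    · subst hae
      have he : (e.1 == e.1) = true := by simp
      rw [if_pos he, pvInner_skip l _ _ h.1, pvM1, PySem.Dict.getD_modify, if_pos rfl]
    · have he : ¬ (e.1 == a) = true := by simp [Ne.symm hae]
      rw [if_neg he, ih _ h.2]
      cases hx : (PySem.Dict.mk l).get? a <;>
        simp only [pvM1, PySem.Dict.getD_modify, if_neg hae]

theorem pvOuter_uniq (V : List (String × List (String × String × Int)))
    (d : PySem.Dict String (PySem.Set String)) (a : String)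
    (h : ∀ p ∈ V, (p.2.map (fun e => e.1)).Nodup) :
    (V.foldl (fun d p => p.2.foldl pvM1 d) d).getD a PySem.Set.empty =
      (pvDatas V a).foldl PySem.Set.add (d.getD a PySem.Set.empty) := by
  induction V generalizing d with
  | nil => rfl
  | cons p V ih =>
    rw [List.foldl_cons, ih _ (fun q hq => h q (List.mem_cons_of_mem _ hq))]
    have hrhs : pvDatas (p :: V) a =
        (match pvLk p a with
         | none => pvDatas V a
         | some dl => dl.1 :: pvDatas V a) := by
      rw [pvDatas, List.filterMap_cons]
      cases pvLk p a <;> rfl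
    rw [hrhs]
    have hi := pvInner_uniq p.2 d a (h p List.mem_cons_self)
    rw [show (PySem.Dict.mk p.2).get? a = pvLk p a from rfl] at hi
    cases hx : pvLk p a <;> rw [hx] at hi <;> rw [hi] <;> rfl

theorem pvInner_present (l : List (String × String × Int)) (d : PySem.Dict String Int)
    (a : String) (h : (l.map (fun e => e.1)).Nodup) :
    (l.foldl pvM2 d).getD a 0 =
      d.getD a 0 + (if ((PySem.Dict.mk l).get? a).isSome then 1 else 0) := by
  have h1 : l.foldl pvM2 d = (l.map (fun e => e.1)).foldl
      (fun d x => d.modify x 0 (fun c => c + 1)) d := by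
    rw [List.foldl_map]
    rfl
  rw [h1, PySem.Dict.getD_foldl_modify_add_one]
  congr 1
  by_cases hm : a ∈ l.map (fun e => e.1)
  · rw [List.count_eq_one_of_mem h hm]
    have : ((PySem.Dict.mk l).get? a).isSome := by
      rw [← PySem.Dict.contains_eq_isSome_get?]
      exact (PySem.Dict.contains_iff_mem_keys _ _).mpr (by simpa [PySem.Dict.keys_mk] using hm)
    rw [if_pos this]
    rfl
  · rw [List.count_eq_zero_of_not_mem hm]
    have : ¬ ((PySem.Dict.mk l).get? a).isSome := by
      rw [← PySem.Dict.contains_eq_isSome_get?]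
      intro hc
      exact hm (by simpa [PySem.Dict.keys_mk] using (PySem.Dict.contains_iff_mem_keys _ _).mp hc)
    rw [if_neg this]
    rfl

theorem pvOuter_present (V : List (String × List (String × String × Int)))
    (d : PySem.Dict String Int) (a : String)
    (h : ∀ p ∈ V, (p.2.map (fun e => e.1)).Nodup) :
    (V.foldl (fun d p => p.2.foldl pvM2 d) d).getD a 0 =
      d.getD a 0 + (V.countP (fun p => (pvLk p a).isSome) : Int) := by
  induction V generalizing d with
  | nil => simp
  | cons p V ih =>
    rw [List.foldl_cons, ih _ (fun q hq => h q (List.mem_cons_of_mem _ hq))]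
    rw [pvInner_present p.2 d a (h p List.mem_cons_self)]
    rw [List.countP_cons]
    rw [pvLk]
    by_cases hx : ((PySem.Dict.mk p.2).get? a).isSome <;> simp [hx] <;> ring

-- ===== VERDICT (by name: the statement is the Claim_ definition above) =====
theorem find_rtd_outl_differences_spec : Claim_equal_find_rtd_outl_differences := by
  intro V _hD hPre
  obtain ⟨hO, hI⟩ := hPre
  unfold Spec_find_rtd_outl_differences
  unfold find_rtd_outl_differences find_rtd_outl_differences_alt
  by_cases hlen : V.length < 2
  · rw [if_pos hlen, if_pos hlen]
  rw [if_neg hlen, if_neg hlen]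
  simp only [pvTallies_eq]
  rw [pvKeys_eq V PySem.Dict.empty]
  have hek : (PySem.Dict.empty : PySem.Dict String (PySem.Set String)).keys
      = (PySem.Set.empty : PySem.Set String) := rfl
  rw [hek]
  apply PySem.List.foldl_congr_mem
  intro acc x hx
  have hxa : x ∈ V.foldl (fun s p => PySem.Set.update s (PySem.Dict.mk p.2).keys)
      PySem.Set.empty := (PySem.List.mem_sorted _ _ _ _).mp hx
  have hsome : ∃ p ∈ V, (pvLk p x).isSome := by
    rcases (pvMem_addrs V PySem.Set.empty x).mp hxa with h | h
    · cases h
    · exact h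
  have hdne : pvDatas V x ≠ [] := by
    obtain ⟨p, hp, hs⟩ := hsome
    obtain ⟨dl, hdl⟩ := Option.isSome_iff_exists.mp hs
    have hm : dl.1 ∈ pvDatas V x := List.mem_filterMap.mpr ⟨p, hp, by rw [hdl]; rfl⟩
    exact List.ne_nil_of_mem hm
  have hitems := pvA_items V x hO
  have hvals : (pvA_version_values V x).values = V.map (fun p => pvConv (pvLk p x)) := by
    show (pvA_version_values V x).items.map (fun q => q.2) = _
    rw [hitems, List.map_map]
    rfl
  have hfm : (V.map (fun p => pvConv (pvLk p x))).filterMap (fun dl => dl.1) = pvDatas V x := by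
    rw [List.filterMap_map, pvDatas]
    congr 1
    funext p
    show (pvConv (pvLk p x)).1 = _
    cases pvLk p x <;> rfl
  have hnone : ((V.map (fun p => pvConv (pvLk p x))).any fun dl => dl.1.isNone)
      = V.any (fun p => (pvLk p x).isNone) := by
    rw [List.any_map]
    congr 1
    funext p
    show (pvConv (pvLk p x)).1.isNone = _
    cases pvLk p x <;> rfl
  have huB : (V.foldl (fun d p => p.2.foldl pvM1 d) PySem.Dict.empty).getD x PySem.Set.empty
      = PySem.Set.ofList (pvDatas V x) := by
    rw [pvOuter_uniq V PySem.Dict.empty x hI, PySem.Set.ofList_eq_foldl]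
    rfl
  have hpB : (V.foldl (fun d p => p.2.foldl pvM2 d) PySem.Dict.empty).getD x 0
      = (V.countP (fun p => (pvLk p x).isSome) : Int) := by
    rw [pvOuter_present V PySem.Dict.empty x hI]
    show (0 : Int) + _ = _
    ring
  rw [hvals, hitems, hfm, hnone, huB, hpB]
  have hpay : (V.map (fun p => (p.1,
      match (PySem.Dict.mk p.2).get? x with
      | some dl => ((some dl.1, some dl.2) : Option String × Option Int)
      | none => (none, none)))) = V.map (fun p => (p.1, pvConv (pvLk p x))) := rfl
  rw [hpay]
  have hL1 : 1 ≤ (PySem.Set.ofList (pvDatas V x)).len := by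
    obtain ⟨y, hy⟩ := List.exists_mem_of_ne_nil _ hdne
    have : y ∈ PySem.Set.ofList (pvDatas V x) := (PySem.Set.mem_ofList _ _).mpr hy
    have hpos : 0 < (PySem.Set.ofList (pvDatas V x)).length := List.length_pos_of_mem this
    show (1 : Int) ≤ ((PySem.Set.ofList (pvDatas V x)).length : Int)
    exact_mod_cast hpos
  have hmn : (V.any (fun p => (pvLk p x).isNone)) = true ↔
      (V.countP (fun p => (pvLk p x).isSome) : Int) < (V.length : Int) := by
    rw [List.any_eq_true]
    have hle : V.countP (fun p => (pvLk p x).isSome) ≤ V.length := List.countP_le_length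
    constructor
    · rintro ⟨p, hp, hn⟩
      have hne : V.countP (fun p => (pvLk p x).isSome) ≠ V.length := by
        intro he
        have := List.countP_eq_length.mp he p hp
        rw [Option.isNone_iff_eq_none.mp hn] at this
        cases this
      have : V.countP (fun p => (pvLk p x).isSome) < V.length := lt_of_le_of_ne hle hne
      exact_mod_cast this
    · intro hlt
      have hlt' : V.countP (fun p => (pvLk p x).isSome) < V.length := by exact_mod_cast hlt
      by_contra hall
      push Not at hall
      have : V.countP (fun p => (pvLk p x).isSome) = V.length := by
        apply List.countP_eq_length.mpr
        intro p hp
        have := hall p hp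
        cases ho : pvLk p x
        · rw [ho] at this
          exact absurd rfl this
        · rfl
      omega
  have hcond : (1 < (PySem.Set.ofList (pvDatas V x)).len ∨
        ((PySem.Set.ofList (pvDatas V x)).len = 1 ∧
          (V.any (fun p => (pvLk p x).isNone)) = true)) ↔
      (1 < (PySem.Set.ofList (pvDatas V x)).len ∨
        (V.countP (fun p => (pvLk p x).isSome) : Int) < (V.length : Int)) := by
    constructor
    · rintro (h | ⟨_, ha⟩)
      · exact Or.inl h
      · exact Or.inr (hmn.mp ha)
    · rintro (h | hc)
      · exact Or.inl h
      · by_cases hL : 1 < (PySem.Set.ofList (pvDatas V x)).len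
        · exact Or.inl hL
        · exact Or.inr ⟨by omega, hmn.mpr hc⟩
  exact if_congr hcond rfl rfl
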